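-- pv_equiv track=rewrite | github.com/YoloHanSolo/Sequence-Transformator | diff_eval.py | fun_operation
-- ===== SOURCE A (Python) =====
-- def fun_operation(seq_list, operation):
--     result = []
--     for i in range(len(seq_list)):
--         result.append([])
--     result[0] = seq_list.copy()
--     for i in range(len(seq_list)):
--         for k in range(len(seq_list) - i - 1):
--             if operation == "diff":
--                 result[i+1].append(abs(result[i][k] - result[i][k+1]))
--             elif operation == "neg":
--                 result[i+1].append(result[i][k+1] - result[i][k])
--             elif operation == "sum":
--                 result[i+1].append(result[i][k] + result[i][k+1])
--             elif operation == "integral":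
--                 if i == 0:
--                     result[i+1].append(result[i][0])
--                     continue
--                 sum = 0
--                 for j in range(k+1):
--                     sum += result[i][j]
--                 result[i+1].append(sum)
--             else:
--                 result[i+1].append(result[i][k] + result[i][k+1])
--     return result
-- ===== SOURCE B (Python) =====
-- def fun_operation(seq_list, operation):
--     # Row-by-row generation: each row is derived from the previous one in a
--     # single pass (running prefix sum for "integral"); no table pre-allocation,
--     # no per-element re-summation loop.
--     if not seq_list:
--         return []
--     rows = [list(seq_list)]
--     for i in range(len(seq_list) - 1):
--         prev = rows[-1]
--         if operation == "diff":
--             nxt = [abs(a - b) for a, b in zip(prev, prev[1:])]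
--         elif operation == "neg":
--             nxt = [b - a for a, b in zip(prev, prev[1:])]
--         elif operation == "integral":
--             if i == 0:
--                 nxt = [prev[0]] * (len(prev) - 1)
--             else:
--                 nxt = []
--                 s = 0
--                 ap = nxt.append
--                 for x in prev[:-1]:
--                     s += x
--                     ap(s)
--         else:
--             nxt = [a + b for a, b in zip(prev, prev[1:])]
--         rows.append(nxt)
--     return rows
-- ===== Notes on version B (the rewrite author's own statement) =====
-- stated objective: alternative
-- what changed: B builds the triangle row by row, deriving each row from the previous one in one pass (zip of adjacent pairs; a running prefix sum for 'integral') instead of A's pre-allocated table with nested index loops and, for 'integral', an inner re-summation loop per element.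
import Mathlib
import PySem

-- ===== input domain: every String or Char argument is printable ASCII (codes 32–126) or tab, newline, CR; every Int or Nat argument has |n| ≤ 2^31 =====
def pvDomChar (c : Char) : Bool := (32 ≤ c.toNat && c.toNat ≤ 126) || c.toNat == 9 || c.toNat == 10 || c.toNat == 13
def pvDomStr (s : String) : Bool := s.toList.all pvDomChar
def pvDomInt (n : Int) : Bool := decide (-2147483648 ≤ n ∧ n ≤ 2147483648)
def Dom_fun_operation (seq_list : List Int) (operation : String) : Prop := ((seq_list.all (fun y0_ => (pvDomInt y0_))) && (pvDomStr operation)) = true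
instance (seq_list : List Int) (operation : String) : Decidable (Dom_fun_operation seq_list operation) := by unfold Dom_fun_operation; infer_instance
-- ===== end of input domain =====

-- B builds the triangle row by row with a running prefix sum for "integral" (no inner
-- re-summation loop per element); equal return values proved on non-empty input
-- (A raises IndexError on []).

-- ===== PORT A =====
-- Inner loop body of A's outer iteration i (reads result[i], appends to result[i+1]);
-- the indices i, i+1, k, k+1 are in range on every admitted input, so pyGetD's default
-- is never used; result[i+1].append(v) is a modify at the non-negative index i+1.
def bodyA (operation : String) (n : Int) (result0 : List (List Int)) (i : Int) : List (List Int) :=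
  (PySem.List.pyRange 0 (n - i - 1) 1).foldl (fun result k =>
    let ri := PySem.List.pyGetD result i []
    let v : Int :=
      if operation == "diff" then |PySem.List.pyGetD ri k 0 - PySem.List.pyGetD ri (k+1) 0|
      else if operation == "neg" then PySem.List.pyGetD ri (k+1) 0 - PySem.List.pyGetD ri k 0
      else if operation == "sum" then PySem.List.pyGetD ri k 0 + PySem.List.pyGetD ri (k+1) 0
      else if operation == "integral" then
        if i == 0 then PySem.List.pyGetD ri 0 0
        else (PySem.List.pyRange 0 (k+1) 1).foldl (fun s j => s + PySem.List.pyGetD ri j 0) 0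
      else PySem.List.pyGetD ri k 0 + PySem.List.pyGetD ri (k+1) 0
    result.modify (i+1).toNat (fun row => row ++ [v])) result0

def fun_operation (seq_list : List Int) (operation : String) : List (List Int) :=
  let n : Int := seq_list.length
  let result : List (List Int) := (PySem.List.pyRange 0 n 1).map (fun _ => ([] : List Int))
  let result := result.set 0 seq_list   -- result[0] = seq_list.copy(); IndexError on [] is excluded by Pre_
  (PySem.List.pyRange 0 n 1).foldl (bodyA operation n) result

-- ===== PORT B =====
def nextRowB (operation : String) (i : Int) (prev : List Int) : List Int :=
  if operation == "diff" then (prev.zip (PySem.List.slice prev (some 1) none)).map (fun p => |p.1 - p.2|)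
  else if operation == "neg" then (prev.zip (PySem.List.slice prev (some 1) none)).map (fun p => p.2 - p.1)
  else if operation == "integral" then
    if i == 0 then List.replicate (prev.length - 1) (PySem.List.pyGetD prev 0 0)
    else ((PySem.List.slice prev none (some (-1))).foldl
            (fun (st : Int × List Int) x => (st.1 + x, st.2 ++ [st.1 + x])) (0, [])).2
  else (prev.zip (PySem.List.slice prev (some 1) none)).map (fun p => p.1 + p.2)

def fun_operation_alt (seq_list : List Int) (operation : String) : List (List Int) :=
  if seq_list = [] then []
  else
    (PySem.List.pyRange 0 ((seq_list.length : Int) - 1) 1).foldl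
      (fun rows i => rows ++ [nextRowB operation i (rows.getLastD [])]) [seq_list]

-- ===== PRECONDITION & SPEC =====
-- A executes 'result[0] = seq_list.copy()' on a table of len(seq_list) rows: on the
-- empty list this raises IndexError, so Pre_ excludes exactly the empty list.
def Pre_fun_operation (seq_list : List Int) (operation : String) : Prop := seq_list ≠ []
instance (seq_list : List Int) (operation : String) : Decidable (Pre_fun_operation seq_list operation) := by unfold Pre_fun_operation; infer_instance

def pvWitness_fun_operation : List Int × String := ([1, 4, 2, 8], "integral")

def Spec_fun_operation (seq_list : List Int) (operation : String) (out : List (List Int)) : Prop := out = fun_operation_alt seq_list operation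
instance (seq_list : List Int) (operation : String) (out : List (List Int)) : Decidable (Spec_fun_operation seq_list operation out) := by unfold Spec_fun_operation; infer_instance

-- ===== CLAIM (what is proved, stated in full; the proofs are below) =====
def Claim_equal_fun_operation : Prop := ∀ (seq_list : List Int) (operation : String), Dom_fun_operation seq_list operation → Pre_fun_operation seq_list operation → Spec_fun_operation seq_list operation (fun_operation seq_list operation)

-- ===== LEMMAS AND PROOFS =====

-- The row sequence both programs compute: row 0 is the input, row (i+1) derives from row i.
def rowOf (operation : String) (seq : List Int) : Nat -> List Int
  | 0 => seq
  | i+1 => nextRowB operation (i : Int) (rowOf operation seq i)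

-- prefix sums, structurally
def psums (s : Int) : List Int -> List Int
  | [] => []
  | x :: xs => (s + x) :: psums (s + x) xs

theorem fold_psums (l : List Int) : forall (s : Int) (acc : List Int),
    l.foldl (fun (st : Int × List Int) x => (st.1 + x, st.2 ++ [st.1 + x])) (s, acc)
      = (s + l.sum, acc ++ psums s l) := by
  induction l with
  | nil => intro s acc; simp [psums]
  | cons x xs ih => intro s acc; simp [psums, ih (s + x) (acc ++ [s + x]), add_assoc]

theorem psums_eq_map (l : List Int) : forall (s : Int),
    psums s l = (List.range l.length).map (fun k => s + (l.take (k+1)).sum) := by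
  induction l with
  | nil => intro s; simp [psums]
  | cons x xs ih =>
    intro s
    simp only [psums, List.length_cons, List.range_succ_eq_map, List.map_cons, List.map_map]
    refine congrArg₂ _ (by simp) ?_
    rw [ih (s + x)]
    apply List.map_congr_left
    intro k _
    simp [add_assoc]

theorem length_psums (l : List Int) : forall s, (psums s l).length = l.length := by
  induction l with
  | nil => intro s; simp [psums]
  | cons x xs ih => intro s; simp [psums, ih]

-- adjacent-pair map as an index map
theorem range_map_pair (f : Int -> Int -> Int) (r : List Int) :
    (List.range (r.length - 1)).map (fun k => f (r.getD k 0) (r.getD (k+1) 0))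
      = (r.zip r.tail).map (fun p => f p.1 p.2) := by
  induction r with
  | nil => simp
  | cons a t ih =>
    cases t with
    | nil => simp
    | cons b t' =>
      rw [List.tail_cons] at ih
      simp only [List.length_cons, Nat.add_sub_cancel, List.range_succ_eq_map, List.map_cons,
        List.map_map, List.tail_cons, List.zip_cons_cons]
      refine congrArg₂ _ rfl ?_
      rw [← ih]
      simp only [List.length_cons, Nat.add_sub_cancel]
      apply List.map_congr_left
      intro k _
      simp [Nat.succ_eq_add_one]

-- the value A appends at inner index k of outer row i, reading row r = result[i]
def elemA (op : String) (i : Int) (r : List Int) (k : Int) : Int :=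
  if op == "diff" then |PySem.List.pyGetD r k 0 - PySem.List.pyGetD r (k+1) 0|
  else if op == "neg" then PySem.List.pyGetD r (k+1) 0 - PySem.List.pyGetD r k 0
  else if op == "sum" then PySem.List.pyGetD r k 0 + PySem.List.pyGetD r (k+1) 0
  else if op == "integral" then
    if i == 0 then PySem.List.pyGetD r 0 0
    else (PySem.List.pyRange 0 (k+1) 1).foldl (fun s j => s + PySem.List.pyGetD r j 0) 0
  else PySem.List.pyGetD r k 0 + PySem.List.pyGetD r (k+1) 0

theorem bodyA_eq (op : String) (n : Int) (result0 : List (List Int)) (i : Int) :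
    bodyA op n result0 i
      = (PySem.List.pyRange 0 (n - i - 1) 1).foldl
          (fun result k => result.modify (i+1).toNat
            (fun row => row ++ [elemA op i (PySem.List.pyGetD result i []) k])) result0 := rfl

theorem modify_append_cons {a : Type} (done : List a) (cur : a) (rest : List a) (f : a -> a) :
    (done ++ cur :: rest).modify done.length f = done ++ f cur :: rest := by
  induction done with
  | nil => rfl
  | cons x d ih => simpa [List.modify] using ih

theorem map_getD_range_eq_take (r : List Int) (m : Nat) (h : m <= r.length) :
    (List.range m).map (fun j => r.getD j 0) = r.take m := by
  apply List.ext_getElem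
  . simp [Nat.min_eq_left h]
  . intro j h1 h2
    simp only [List.getElem_map, List.getElem_range, List.getElem_take]
    rw [List.getD_eq_getElem]

theorem innerFold (op : String) (i : Nat) (r : List Int) (done rest : List (List Int))
    (hlen : done.length = i+1) (hget : done.getD i [] = r) :
    forall (m : Nat) (cur : List Int),
    (PySem.List.pyRange 0 (m:Int) 1).foldl
      (fun result k => result.modify ((i:Int)+1).toNat
        (fun row => row ++ [elemA op (i:Int) (PySem.List.pyGetD result (i:Int) []) k]))
      (done ++ cur :: rest)
    = done ++ (cur ++ (List.range m).map (fun (k : Nat) => elemA op (i:Int) r (k:Int))) :: rest := by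
  intro m
  induction m with
  | zero =>
    intro cur
    rw [Nat.cast_zero, PySem.List.pyRange_one_eq_nil (le_refl 0)]
    simp
  | succ m ih =>
    intro cur
    have hc : ((m+1 : Nat) : Int) = (m : Int) + 1 := by push_cast; ring
    rw [hc, PySem.List.pyRange_one_succ_right (by omega), List.foldl_append, ih]
    simp only [List.foldl_cons, List.foldl_nil]
    have hi1 : (((i:Int))+1).toNat = done.length := by omega
    have hgd : PySem.List.pyGetD (done ++ (cur ++ (List.range m).map
        (fun (k : Nat) => elemA op (i:Int) r (k:Int))) :: rest) (i:Int) [] = r := by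
      rw [PySem.List.pyGetD_natCast, List.getD_append _ _ _ _ (by omega), hget]
    rw [hgd, hi1, modify_append_cons]
    rw [List.range_succ, List.map_append]
    simp

theorem pair_branch (f : Int -> Int -> Int) (r : List Int) :
    (List.range (r.length - 1)).map
        (fun (k : Nat) => f (PySem.List.pyGetD r (k:Int) 0) (PySem.List.pyGetD r ((k:Int)+1) 0))
      = (r.zip r.tail).map (fun p => f p.1 p.2) := by
  rw [← range_map_pair f r]
  apply List.map_congr_left
  intro k _
  have hc : ((k:Int)+1) = ((k+1 : Nat) : Int) := by push_cast; ring
  rw [hc, PySem.List.pyGetD_natCast, PySem.List.pyGetD_natCast]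

theorem integral_branch (r : List Int) :
    (List.range (r.length - 1)).map
        (fun (k : Nat) => (PySem.List.pyRange 0 ((k:Int)+1) 1).foldl
          (fun s j => s + PySem.List.pyGetD r j 0) 0)
      = ((r.dropLast).foldl (fun (st : Int × List Int) x => (st.1 + x, st.2 ++ [st.1 + x])) (0, [])).2 := by
  rw [fold_psums, psums_eq_map, List.length_dropLast]
  apply List.map_congr_left
  intro k hk
  simp only [List.mem_range] at hk
  have hc : ((k:Int)+1) = ((k+1 : Nat) : Int) := by push_cast; ring
  rw [hc, PySem.List.pyRange_zero_nat, List.foldl_map]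
  have h1 : (List.range (k+1)).foldl (fun s (j:Nat) => s + PySem.List.pyGetD r (j:Int) 0) 0
       = (List.range (k+1)).foldl (fun s (j:Nat) => s + r.getD j 0) 0 := by
    apply PySem.List.foldl_congr_mem
    intro acc x _
    rw [PySem.List.pyGetD_natCast]
  rw [h1, PySem.List.foldl_add, map_getD_range_eq_take r (k+1) (by omega)]
  rw [List.dropLast_eq_take, List.take_take, Nat.min_eq_left (by omega)]

theorem map_elemA (op : String) (i : Nat) (r : List Int) (hr : r ≠ []) :
    (List.range (r.length - 1)).map (fun (k : Nat) => elemA op (i:Int) r (k:Int))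
      = nextRowB op (i:Int) r := by
  unfold elemA nextRowB
  rw [PySem.List.slice_from_one, PySem.List.slice_to_neg_one]
  cases hd : (op == "diff") with
  | true =>
    simp only [Bool.false_eq_true, eq_self_iff_true, if_true, if_false]
    exact pair_branch (fun a b => |a - b|) r
  | false =>
  cases hn : (op == "neg") with
  | true =>
    simp only [Bool.false_eq_true, eq_self_iff_true, if_true, if_false]
    exact pair_branch (fun a b => b - a) r
  | false =>
  cases hs : (op == "sum") with
  | true =>
    have hg : (op == "integral") = false := by
      have h : op = "sum" := by simpa using hs
      subst h; rfl
    simp only [hg, Bool.false_eq_true, eq_self_iff_true, if_true, if_false]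
    exact pair_branch (fun a b => a + b) r
  | false =>
  cases hg : (op == "integral") with
  | false =>
    simp only [Bool.false_eq_true, eq_self_iff_true, if_true, if_false]
    exact pair_branch (fun a b => a + b) r
  | true =>
    simp only [Bool.false_eq_true, eq_self_iff_true, if_true, if_false]
    cases hi : ((i:Int) == 0) with
    | true =>
      simp only [Bool.false_eq_true, eq_self_iff_true, if_true, if_false]
      simp [List.map_const', List.length_range]
    | false =>
      simp only [Bool.false_eq_true, eq_self_iff_true, if_true, if_false]
      exact integral_branch r

theorem length_nextRowB (op : String) (i : Int) (prev : List Int) :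
    (nextRowB op i prev).length = prev.length - 1 := by
  unfold nextRowB
  rw [PySem.List.slice_from_one, PySem.List.slice_to_neg_one]
  split_ifs <;>
    simp [List.length_zip, List.length_tail, fold_psums, length_psums, List.length_dropLast]

theorem length_rowOf (op : String) (seq : List Int) :
    forall i, (rowOf op seq i).length = seq.length - i := by
  intro i
  induction i with
  | zero => simp [rowOf]
  | succ i ih => rw [rowOf, length_nextRowB, ih]; omega

-- table after outer iteration j (rows 0..j built, the rest still empty)
def tabT (op : String) (seq : List Int) (j : Nat) : List (List Int) :=
  (List.range (j+1)).map (rowOf op seq) ++ List.replicate (seq.length - 1 - j) []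

theorem outer_step (op : String) (seq : List Int) (j : Nat) (hj : j + 1 <= seq.length - 1) :
    bodyA op (seq.length : Int) (tabT op seq j) (j : Int) = tabT op seq (j+1) := by
  have hn : 1 <= seq.length := by omega
  rw [bodyA_eq]
  have hb : ((seq.length : Int)) - (j:Int) - 1 = ((seq.length - 1 - j : Nat) : Int) := by omega
  rw [hb]
  have hrep : List.replicate (seq.length - 1 - j) ([] : List Int)
      = [] :: List.replicate (seq.length - 1 - (j+1)) [] := by
    have h : seq.length - 1 - j = (seq.length - 1 - (j+1)) + 1 := by omega
    rw [h, List.replicate_succ]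
  have hdone : ((List.range (j+1)).map (rowOf op seq)).length = j + 1 := by simp
  have hget : ((List.range (j+1)).map (rowOf op seq)).getD j [] = rowOf op seq j :=
    PySem.List.getD_map_range _ _ _ _ (by omega)
  rw [tabT, hrep]
  rw [innerFold op j (rowOf op seq j) _ _ hdone hget]
  have hlen : seq.length - 1 - j = (rowOf op seq j).length - 1 := by
    rw [length_rowOf]; omega
  have hne : rowOf op seq j ≠ [] := by
    have h := length_rowOf op seq j
    intro hc
    rw [hc] at h
    simp at h
    omega
  rw [hlen, map_elemA op j _ hne, List.nil_append]
  rw [tabT]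
  simp [List.range_succ, rowOf]

theorem outer_fold (op : String) (seq : List Int) :
    forall (j : Nat), j <= seq.length - 1 ->
    (PySem.List.pyRange 0 (j:Int) 1).foldl (bodyA op (seq.length : Int)) (tabT op seq 0)
      = tabT op seq j := by
  intro j
  induction j with
  | zero =>
    intro _
    rw [Nat.cast_zero, PySem.List.pyRange_one_eq_nil (le_refl 0)]
    rfl
  | succ j ih =>
    intro hj
    have hc : ((j+1 : Nat) : Int) = (j : Int) + 1 := by push_cast; ring
    rw [hc, PySem.List.pyRange_one_succ_right (by omega), List.foldl_append,
      ih (by omega)]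
    simp only [List.foldl_cons, List.foldl_nil]
    exact outer_step op seq j hj

theorem alt_fold (op : String) (seq : List Int) :
    forall (j : Nat), (PySem.List.pyRange 0 (j:Int) 1).foldl
      (fun rows i => rows ++ [nextRowB op i (rows.getLastD [])]) [seq]
      = (List.range (j+1)).map (rowOf op seq) := by
  intro j
  induction j with
  | zero =>
    rw [Nat.cast_zero, PySem.List.pyRange_one_eq_nil (le_refl 0)]
    simp [rowOf]
  | succ j ih =>
    have hc : ((j+1 : Nat) : Int) = (j : Int) + 1 := by push_cast; ring
    rw [hc, PySem.List.pyRange_one_succ_right (by omega), List.foldl_append, ih]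
    simp only [List.foldl_cons, List.foldl_nil]
    rw [List.range_succ (n := j+1), List.map_append]
    have h : ((List.range (j+1)).map (rowOf op seq)).getLastD [] = rowOf op seq j := by
      rw [List.range_succ, List.map_append]
      simp
    rw [h]
    rfl

theorem fun_operation_eq_rows (seq : List Int) (op : String) (hne : seq ≠ []) :
    fun_operation seq op = (List.range seq.length).map (rowOf op seq) := by
  have hn : 1 <= seq.length := by
    have := List.length_pos_of_ne_nil hne
    omega
  show (PySem.List.pyRange 0 (seq.length : Int) 1).foldl (bodyA op (seq.length : Int))
      (((PySem.List.pyRange 0 (seq.length : Int) 1).map (fun _ => ([] : List Int))).set 0 seq)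
      = (List.range seq.length).map (rowOf op seq)
  have hinit : (((PySem.List.pyRange 0 (seq.length : Int) 1).map
      (fun _ => ([] : List Int))).set 0 seq) = tabT op seq 0 := by
    rw [List.map_const', PySem.List.length_pyRange_one]
    have h1 : ((seq.length : Int) - 0).toNat = seq.length := by omega
    rw [h1]
    have h2 : seq.length = (seq.length - 1) + 1 := by omega
    rw [h2, List.replicate_succ, List.set_cons_zero, tabT]
    simp [rowOf]
  rw [hinit]
  have hsplit : PySem.List.pyRange 0 (seq.length : Int) 1
      = PySem.List.pyRange 0 ((seq.length - 1 : Nat) : Int) 1 ++ [((seq.length - 1 : Nat) : Int)] := by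
    have hc : ((seq.length : Nat) : Int) = ((seq.length - 1 : Nat) : Int) + 1 := by omega
    rw [hc, PySem.List.pyRange_one_succ_right (by omega)]
  rw [hsplit, List.foldl_append, outer_fold op seq (seq.length - 1) (le_refl _)]
  simp only [List.foldl_cons, List.foldl_nil]
  have hlast : bodyA op (seq.length : Int) (tabT op seq (seq.length - 1))
      ((seq.length - 1 : Nat) : Int) = tabT op seq (seq.length - 1) := by
    rw [bodyA_eq]
    have h : (seq.length : Int) - ((seq.length - 1 : Nat) : Int) - 1 = 0 := by omega
    rw [h, PySem.List.pyRange_one_eq_nil (le_refl 0)]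
    rfl
  rw [hlast, tabT]
  have h : seq.length - 1 - (seq.length - 1) = 0 := by omega
  rw [h]
  have h2 : seq.length - 1 + 1 = seq.length := by omega
  simp [h2]

theorem fun_operation_alt_eq_rows (seq : List Int) (op : String) (hne : seq ≠ []) :
    fun_operation_alt seq op = (List.range seq.length).map (rowOf op seq) := by
  have hn : 1 <= seq.length := by
    have := List.length_pos_of_ne_nil hne
    omega
  unfold fun_operation_alt
  rw [if_neg hne]
  have hc : (seq.length : Int) - 1 = ((seq.length - 1 : Nat) : Int) := by omega
  rw [hc, alt_fold op seq (seq.length - 1)]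
  have h2 : seq.length - 1 + 1 = seq.length := by omega
  rw [h2]

-- ===== VERDICT (by name: the statement is the Claim_ definition above) =====
theorem fun_operation_spec : Claim_equal_fun_operation := by
  intro seq op _ hpre
  unfold Spec_fun_operation
  rw [fun_operation_eq_rows seq op hpre, fun_operation_alt_eq_rows seq op hpre]
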